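-- pv_equiv track=rewrite | github.com/spang-lab/LearnMHN | mhn/model.py | bits_fixed_n
-- ===== SOURCE A (Python) =====
-- from typing import Iterator, Optional, Union
--
-- def bits_fixed_n(n: int, k: int) -> Iterator[int]:
--     """
--     Generator over integers whose binary representation has a fixed number of 1s, in lexicographical order.
--
--     From https://graphics.stanford.edu/~seander/bithacks.html#NextBitPermutation
--
--     Args:
--         n (int): How many 1s there should be.
--         k (int): How many bits the integer should have.
--
--     Yields:
--         Iterator[int]: Integers with the specified binary properties.
--     """
--
--     v = int("1" * n, 2)
--     stop_no = v << (k - n)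
--     w = -1
--     while w != stop_no:
--         t = (v | (v - 1)) + 1
--         w = t | ((((t & -t)) // (v & (-v)) >> 1) - 1)
--         v, w = w, v
--         yield w
-- ===== SOURCE B (Python) =====
-- def bits_fixed_n(n, k):
--     # Same bounds as the spec: smallest and largest k-bit integer with n one-bits.
--     # They validate the input exactly like A (ValueError for n <= 0 and for k < n).
--     lo = int("1" * n, 2)
--     hi = lo << (k - n)
--     # Build the ascending list of j-one-bit integers level by level: a number with
--     # j+1 one-bits and top set bit i is (1 << i) + x for a unique x < (1 << i) with
--     # j one-bits, and that enumeration is already ascending.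
--     prev = [0]  # integers with 0 one-bits, ascending
--     for _ in range(n):
--         prev = [(1 << i) + x for i in range(hi.bit_length()) for x in prev if x < (1 << i)]
--     yield from prev
-- ===== Notes on version B (the rewrite author's own statement) =====
-- stated objective: simpler
-- what changed: Replaced Gosper's bit-twiddling successor iteration by a level-by-level construction: keep A's lo/hi bound computations (same ValueError behaviour), then n times replace the ascending list of j-one-bit integers by [(1<<i)+x for i in range(hi.bit_length()) for x in prev if x < (1<<i)], which enumerates the (j+1)-one-bit integers in the same ascending order.
import Mathlib
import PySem

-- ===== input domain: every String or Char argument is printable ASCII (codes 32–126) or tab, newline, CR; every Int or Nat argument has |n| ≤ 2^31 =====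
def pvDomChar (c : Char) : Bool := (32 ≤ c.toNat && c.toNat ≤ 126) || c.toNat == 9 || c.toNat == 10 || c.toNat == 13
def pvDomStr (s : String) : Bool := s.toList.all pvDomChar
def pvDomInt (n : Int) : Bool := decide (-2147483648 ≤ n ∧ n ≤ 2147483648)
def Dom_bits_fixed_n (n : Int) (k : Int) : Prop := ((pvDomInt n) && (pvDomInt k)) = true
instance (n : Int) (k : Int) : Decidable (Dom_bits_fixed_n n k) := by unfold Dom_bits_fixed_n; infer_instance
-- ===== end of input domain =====

-- B replaces Gosper's bit-twiddling successor loop by a level-by-level construction of the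
-- ascending lists of j-one-bit integers (objective: simpler). A is a generator; equivalence
-- is about the yielded sequence as a list. Neither version mutates its arguments.

-- ===== PORT A =====
-- int("1" * n, 2): literal parse of the string of n ones (raises ValueError for n ≤ 0: excluded by Pre_)
def onesLiteral (n : Int) : Int :=
  (List.replicate n.toNat '1').foldl (fun acc c => 2 * acc + (if c == '1' then 1 else 0)) 0

-- the while loop of A; state (v, w), fuel bounds the number of iterations (each one yields)
def gosperLoop (fuel : Nat) (stop v w : Int) : List Int :=
  match fuel with
  | 0 => []
  | fuel + 1 =>
    if w ≠ stop then
      let t := PySem.Int.bor v (v - 1) + 1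
      let w2 := PySem.Int.bor t
        (PySem.Int.floordiv (PySem.Int.band t (-t)) (PySem.Int.band v (-v)) >>> (1 : Nat) - 1)
      -- v, w = w2, v ; yield w (the old v)
      v :: gosperLoop fuel stop w2 v
    else []

def bits_fixed_n (n : Int) (k : Int) : List Int :=
  if n ≤ 0 then []          -- Python: int("", 2) raises ValueError; excluded by Pre_
  else if k < n then []     -- Python: v << (k - n) raises ValueError (negative shift); excluded by Pre_
  else
    let v := onesLiteral n
    let stop := v <<< (k - n).toNat
    -- fuel: the loop yields strictly increasing values from v up to stop, so at most stop - v + 1 times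
    gosperLoop ((stop - v).toNat + 1) stop v (-1)

-- ===== PORT B =====
-- one pass of B's comprehension: [(1 << i) + x for i in range(k) for x in prev if x < (1 << i)]
def altLevel (k : Int) (prev : List Int) : List Int :=
  (PySem.List.pyRange 0 k 1).flatMap
    (fun i => (prev.filter (fun x => x < (1 : Int) <<< i.toNat)).map
      (fun x => (1 : Int) <<< i.toNat + x))

def bits_fixed_n_alt (n : Int) (k : Int) : List Int :=
  if n ≤ 0 then []          -- Python: int("", 2) raises ValueError; excluded by Pre_
  else if k < n then []     -- Python: lo << (k - n) raises ValueError (negative shift); excluded by Pre_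
  else
    let lo := onesLiteral n
    let hi := lo <<< (k - n).toNat
    -- hi.bit_length() is Nat.size of the (nonnegative) bound
    (List.range n.toNat).foldl (fun prev _ => altLevel ((hi.toNat.size : Nat) : Int) prev) [0]

-- ===== PRECONDITION & SPEC =====
-- Pre_ excludes exactly the inputs on which the Python A raises ValueError: n ≤ 0 (int("", 2))
-- and k < n (negative shift count).
def Pre_bits_fixed_n (n : Int) (k : Int) : Prop := 1 ≤ n ∧ n ≤ k
instance (n : Int) (k : Int) : Decidable (Pre_bits_fixed_n n k) := by
  unfold Pre_bits_fixed_n; infer_instance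

def pvWitness_bits_fixed_n : Int × Int := (2, 4)

def Spec_bits_fixed_n (n : Int) (k : Int) (out : List Int) : Prop := out = bits_fixed_n_alt n k
instance (n : Int) (k : Int) (out : List Int) : Decidable (Spec_bits_fixed_n n k out) := by
  unfold Spec_bits_fixed_n; infer_instance

-- ===== CLAIM (what is proved, stated in full; the proofs are below) =====
def Claim_equal_bits_fixed_n : Prop := ∀ (n : Int) (k : Int), Dom_bits_fixed_n n k → Pre_bits_fixed_n n k → Spec_bits_fixed_n n k (bits_fixed_n n k)

-- ===== LEMMAS AND PROOFS =====

def ones (n : Nat) : Nat :=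
  if n = 0 then 0 else ones (n / 2) + n % 2
decreasing_by exact Nat.div_lt_self (Nat.pos_of_ne_zero (by assumption)) (by omega)

theorem ones_zero : ones 0 = 0 := by unfold ones; simp

theorem ones_step (n : Nat) : n ≠ 0 → ones n = ones (n / 2) + n % 2 := by
  intro h; rw [ones]; simp [h]

theorem ones_two_mul_add (q r : Nat) (hr : r < 2) : ones (2 * q + r) = ones q + r := by
  rcases Nat.eq_zero_or_pos (2 * q + r) with h0 | h0
  · have hq : q = 0 := by omega
    have hr0 : r = 0 := by omega
    subst hq; subst hr0; simp [ones_zero]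
  · rw [ones_step (2 * q + r) (by omega)]
    have h1 : (2 * q + r) / 2 = q := by omega
    have h2 : (2 * q + r) % 2 = r := by omega
    rw [h1, h2]

theorem ones_add_pow (q r s : Nat) (hr : r < 2 ^ s) :
    ones (q * 2 ^ s + r) = ones q + ones r := by
  induction s generalizing q r with
  | zero =>
    norm_num at hr
    subst hr; simp [ones_zero]
  | succ s ih =>
    have h : q * 2 ^ (s + 1) + r = 2 * (q * 2 ^ s + r / 2) + r % 2 := by
      have := Nat.div_add_mod r 2; ring_nf; omega
    rw [h, ones_two_mul_add _ _ (by omega), ih q (r / 2) (by omega)]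
    rcases Nat.eq_zero_or_pos r with h0 | h0
    · subst h0; simp
    · rw [ones_step r (by omega)]; omega

theorem ones_pow_sub_one (b : Nat) : ones (2 ^ b - 1) = b := by
  induction b with
  | zero => simp [ones_zero]
  | succ b ih =>
    have h : 2 ^ (b + 1) - 1 = 2 * (2 ^ b - 1) + 1 := by
      have : 1 ≤ 2 ^ b := Nat.one_le_two_pow; omega
    rw [h, ones_two_mul_add _ _ (by omega), ih]

theorem ones_min (r : Nat) : 2 ^ ones r - 1 ≤ r := by
  induction r using Nat.strong_induction_on with
  | _ r ih =>
    rcases Nat.eq_zero_or_pos r with h0 | h0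
    · subst h0; simp [ones_zero]
    · rw [ones_step r (by omega)]
      have h2 := ih (r / 2) (by omega)
      have hm2 : r % 2 = 0 ∨ r % 2 = 1 := by omega
      rcases hm2 with h | h <;> rw [h]
      · simp only [Nat.add_zero]; omega
      · have hp : 2 ^ (ones (r / 2) + 1) = 2 * 2 ^ ones (r / 2) := by
          rw [pow_succ]; ring
        omega

theorem ones_max (r : Nat) : ∀ a b : Nat, r < 2 ^ (a + b) → ones r = b → r ≤ (2 ^ b - 1) * 2 ^ a := by
  induction r using Nat.strong_induction_on with
  | _ r ih =>
    intro a b hlt hone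
    rcases Nat.eq_zero_or_pos r with h0 | h0
    · subst h0; simp
    · rw [ones_step r (by omega)] at hone
      have hsplit : a + b ≠ 0 := by
        intro h; rw [h] at hlt; norm_num at hlt; omega
      have hpow : 2 ^ (a + b) = 2 * 2 ^ (a + b - 1) := by
        rw [← pow_succ']; congr 1; omega
      rcases Nat.even_or_odd r with he | ho
      · have hm : r % 2 = 0 := Nat.even_iff.mp he
        rw [hm] at hone
        rcases Nat.eq_zero_or_pos a with ha | ha
        · subst ha; simp only [Nat.zero_add] at hlt; simp; omega
        · have := ih (r / 2) (by omega) (a - 1) b (by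
            have h3 : a - 1 + b = a + b - 1 := by omega
            rw [h3]; omega) (by omega)
          have h2 : (2 ^ b - 1) * 2 ^ a = 2 * ((2 ^ b - 1) * 2 ^ (a - 1)) := by
            rw [show 2 ^ a = 2 * 2 ^ (a - 1) from by rw [← pow_succ']; congr 1; omega]; ring
          omega
      · have hm : r % 2 = 1 := Nat.odd_iff.mp ho
        rw [hm] at hone
        have hb : 1 ≤ b := by omega
        have hab : a + (b - 1) = a + b - 1 := by omega
        have := ih (r / 2) (by omega) a (b - 1) (by rw [hab]; omega) (by omega)
        have h5 : 2 ^ b = 2 * 2 ^ (b - 1) := by rw [← pow_succ']; congr 1; omega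
        have hpa : 1 ≤ 2 ^ a := Nat.one_le_two_pow
        have h6 : 1 ≤ 2 ^ (b - 1) := Nat.one_le_two_pow
        have e1 : (2 ^ (b - 1) - 1) * 2 ^ a = 2 ^ (b - 1) * 2 ^ a - 2 ^ a := by
          rw [Nat.sub_mul, one_mul]
        have e2 : (2 ^ b - 1) * 2 ^ a = 2 * (2 ^ (b - 1) * 2 ^ a) - 2 ^ a := by
          rw [h5, Nat.sub_mul, one_mul, mul_assoc]
        have e3 : 2 ^ a ≤ 2 ^ (b - 1) * 2 ^ a := Nat.le_mul_of_pos_left _ (by omega)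
        omega

theorem ones_eq_zero (x : Nat) (h : ones x = 0) : x = 0 := by
  induction x using Nat.strong_induction_on with
  | _ x ih =>
    rcases Nat.eq_zero_or_pos x with h0 | h0
    · exact h0
    · rw [ones_step x (by omega)] at h
      have := ih (x / 2) (by omega) (by omega)
      omega

theorem land_pred_of_odd (c a : Nat) (hc : c % 2 = 1) :
    (c * 2 ^ a) &&& (c * 2 ^ a - 1) = c * 2 ^ a - 2 ^ a := by
  set d := c / 2 with hd
  have hc2 : c = 2 * d + 1 := by omega
  have hN : c * 2 ^ a = 2 ^ (a + 1) * d + 2 ^ a := by rw [hc2]; ring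
  have hN1 : c * 2 ^ a - 1 = 2 ^ (a + 1) * d + (2 ^ a - 1) := by
    have : 1 ≤ 2 ^ a := Nat.one_le_two_pow
    omega
  have hN2 : c * 2 ^ a - 2 ^ a = d * 2 ^ (a + 1) := by rw [hN]; ring_nf; omega
  have hpa : 2 ^ a < 2 ^ (a + 1) := by have := Nat.one_le_two_pow (n := a); rw [pow_succ]; omega
  have hpa1 : 2 ^ a - 1 < 2 ^ (a + 1) := by omega
  apply Nat.eq_of_testBit_eq
  intro j
  rw [Nat.testBit_land, hN1, hN2, hN,
    Nat.testBit_two_pow_mul_add _ hpa, Nat.testBit_two_pow_mul_add _ hpa1,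
    Nat.testBit_mul_two_pow]
  by_cases hj : j < a + 1
  · simp only [hj, if_pos, Nat.testBit_two_pow, Nat.testBit_two_pow_sub_one]
    have : ¬ (a + 1 ≤ j) := by omega
    simp [this]
    intro h; omega
  · simp only [hj, if_neg, Nat.testBit_two_pow]
    have : a + 1 ≤ j := by omega
    simp [this, Bool.and_self]

theorem lor_pred_of_odd (c a : Nat) (hc : c % 2 = 1) :
    (c * 2 ^ a) ||| (c * 2 ^ a - 1) = c * 2 ^ a + 2 ^ a - 1 := by
  set d := c / 2 with hd
  have hc2 : c = 2 * d + 1 := by omega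
  have h1a : (1:Nat) ≤ 2 ^ a := Nat.one_le_two_pow
  have hN : c * 2 ^ a = 2 ^ (a + 1) * d + 2 ^ a := by rw [hc2]; ring
  have hN1 : c * 2 ^ a - 1 = 2 ^ (a + 1) * d + (2 ^ a - 1) := by omega
  have hN2 : c * 2 ^ a + 2 ^ a - 1 = 2 ^ (a + 1) * d + (2 ^ (a + 1) - 1) := by
    rw [hN, pow_succ]; omega
  have hpa : 2 ^ a < 2 ^ (a + 1) := by rw [pow_succ]; omega
  apply Nat.eq_of_testBit_eq
  intro j
  rw [Nat.testBit_lor, hN1, hN2, hN,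
    Nat.testBit_two_pow_mul_add _ hpa, Nat.testBit_two_pow_mul_add _ (by omega),
    Nat.testBit_two_pow_mul_add _ (by omega : 2 ^ (a+1) - 1 < 2 ^ (a+1))]
  by_cases hj : j < a + 1
  · simp only [hj, if_pos, Nat.testBit_two_pow, Nat.testBit_two_pow_sub_one]
    by_cases hja : j = a <;> simp [hja] <;> omega
  · simp [hj]

theorem lor_disjoint (z s y : Nat) (hy : y < 2 ^ s) : (z * 2 ^ s) ||| y = z * 2 ^ s + y := by
  have h1 : z * 2 ^ s + y = 2 ^ s * z + y := by ring
  apply Nat.eq_of_testBit_eq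
  intro j
  rw [Nat.testBit_lor, h1, Nat.testBit_two_pow_mul_add _ hy, Nat.testBit_mul_two_pow]
  by_cases hj : j < s
  · have : ¬ (s ≤ j) := by omega
    simp [hj, this]
  · have hs : s ≤ j := by omega
    have : y.testBit j = false := Nat.testBit_eq_false_of_lt (by
      calc y < 2 ^ s := hy
      _ ≤ 2 ^ j := Nat.pow_le_pow_right (by omega) hs)
    simp [hj, hs, this]

theorem band_neg_self (c : Nat) (hc : 0 < c) :
    PySem.Int.band (c : Int) (-(c : Int)) = ((c - (c &&& (c - 1)) : Nat) : Int) := by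
  rw [PySem.Int.band]
  have h1 : (0:Int) ≤ (c:Int) := by positivity
  have h2 : ¬ ((0:Int) ≤ -(c:Int)) := by omega
  simp only [h1, if_pos, h2, if_neg, if_false]
  have e1 : ((c:Int)).toNat = c := Int.toNat_natCast c
  have e2 : (-(-(c:Int)) - 1).toNat = c - 1 := by omega
  rw [e1, e2]

theorem band_neg_self_odd_mul (c a : Nat) (hc : c % 2 = 1) :
    PySem.Int.band ((c * 2 ^ a : Nat) : Int) (-((c * 2 ^ a : Nat) : Int)) = ((2 ^ a : Nat) : Int) := by
  have hc0 : 0 < c := by omega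
  have h1 : 2 ^ a ≤ c * 2 ^ a := Nat.le_mul_of_pos_left _ hc0
  rw [band_neg_self _ (by positivity), land_pred_of_odd c a hc]
  have h2 : ∀ P V : Nat, P ≤ V → V - (V - P) = P := fun P V hPV => by omega
  rw [h2 _ _ h1]

def gosperStep (v : Int) : Int :=
  let t := PySem.Int.bor v (v - 1) + 1
  PySem.Int.bor t
    (PySem.Int.floordiv (PySem.Int.band t (-t)) (PySem.Int.band v (-v)) >>> (1 : Nat) - 1)

theorem gosperStep_eq (m a b : Nat) (hb : 1 ≤ b) :
    gosperStep ((m * 2 ^ (a + b + 1) + (2 ^ b - 1) * 2 ^ a : Nat) : Int)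
      = (((2 * m + 1) * 2 ^ (a + b) + 2 ^ (b - 1) - 1 : Nat) : Int) := by
  have h1b : (1:Nat) ≤ 2 ^ b := Nat.one_le_two_pow
  have h1a : (1:Nat) ≤ 2 ^ a := Nat.one_le_two_pow
  have h1b1 : (1:Nat) ≤ 2 ^ (b - 1) := Nat.one_le_two_pow
  have h1ab : (1:Nat) ≤ 2 ^ (a + b) := Nat.one_le_two_pow
  obtain ⟨c, hc1⟩ : ∃ c, c = m * 2 ^ (b + 1) + 2 ^ b - 1 := ⟨_, rfl⟩
  have h2b : 2 ^ b = 2 * 2 ^ (b - 1) := by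
    conv_lhs => rw [show b = (b - 1) + 1 by omega]
    rw [pow_succ']
  have h2b1 : 2 ^ (b + 1) = 2 * 2 ^ b := pow_succ' 2 b
  obtain ⟨q, hq⟩ : ∃ q, m * 2 ^ (b + 1) = 2 * q := ⟨m * 2 ^ b, by rw [h2b1]; ring⟩
  obtain ⟨B, hB⟩ : ∃ B, 2 ^ b = 2 * B := ⟨2 ^ (b - 1), h2b⟩
  have hB1 : 1 ≤ B := by omega
  have hco : c % 2 = 1 := by omega
  have hcz : (c : ℤ) + 1 = (m : ℤ) * 2 ^ (b + 1) + 2 ^ b := by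
    have : c + 1 = m * 2 ^ (b + 1) + 2 ^ b := by omega
    exact_mod_cast congrArg (Nat.cast : Nat → ℤ) this
  have hveq : m * 2 ^ (a + b + 1) + (2 ^ b - 1) * 2 ^ a = c * 2 ^ a := by
    zify [h1b]
    linear_combination (-(2:ℤ) ^ a) * hcz
  have f2 : c * 2 ^ a + 2 ^ a = (2 * m + 1) * 2 ^ (a + b) := by
    zify
    linear_combination ((2:ℤ) ^ a) * hcz
  have hvpos : 0 < c * 2 ^ a := by
    have : 0 < c := by omega
    positivity
  rw [hveq]
  simp only [gosperStep]
  have e1 : ((c * 2 ^ a : Nat) : Int) - 1 = ((c * 2 ^ a - 1 : Nat) : Int) := by omega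
  rw [e1, PySem.Int.bor_natCast, lor_pred_of_odd c a hco]
  have e2 : ((c * 2 ^ a + 2 ^ a - 1 : Nat) : Int) + 1 = (((2 * m + 1) * 2 ^ (a + b) : Nat) : Int) := by
    obtain ⟨V, hV⟩ : ∃ V, c * 2 ^ a = V := ⟨_, rfl⟩
    obtain ⟨T, hT⟩ : ∃ T, (2 * m + 1) * 2 ^ (a + b) = T := ⟨_, rfl⟩
    rw [hV, hT] at f2 ⊢
    omega
  rw [e2]
  have ho2 : (2 * m + 1) % 2 = 1 := by omega
  rw [band_neg_self_odd_mul (2 * m + 1) (a + b) ho2, band_neg_self_odd_mul c a hco]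
  have e3 : PySem.Int.floordiv ((2 ^ (a + b) : Nat) : Int) ((2 ^ a : Nat) : Int)
      = ((2 ^ b : Nat) : Int) := by
    rw [PySem.Int.floordiv_natCast]
    congr 1
    rw [pow_add]
    exact Nat.mul_div_cancel_left _ (by positivity)
  rw [e3]
  have e4 : ((2 ^ b : Nat) : Int) >>> (1 : Nat) = ((2 ^ (b - 1) : Nat) : Int) := by
    rw [Int.shiftRight_eq_div_pow]
    rw [show (2:Nat) ^ b = 2 ^ (b - 1) * 2 from by rw [h2b]; ring]
    push_cast
    simp
  rw [e4]
  have e5 : ((2 ^ (b - 1) : Nat) : Int) - 1 = ((2 ^ (b - 1) - 1 : Nat) : Int) := by omega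
  rw [e5, PySem.Int.bor_natCast]
  have hlt : 2 ^ (b - 1) - 1 < 2 ^ (a + b) := by
    have : 2 ^ (b - 1) ≤ 2 ^ (a + b) := Nat.pow_le_pow_right (by omega) (by omega)
    omega
  rw [lor_disjoint _ _ _ hlt]
  congr 1
  obtain ⟨T, hT⟩ : ∃ T, (2 * m + 1) * 2 ^ (a + b) = T := ⟨_, rfl⟩
  rw [hT]
  omega

theorem decompose (v : Nat) (hv : 1 ≤ v) :
    ∃ m a b : Nat, 1 ≤ b ∧ v = m * 2 ^ (a + b + 1) + (2 ^ b - 1) * 2 ^ a := by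
  induction v using Nat.strong_induction_on with
  | _ v ih =>
    rcases Nat.lt_or_ge v 2 with h2 | h2
    · have : v = 1 := by omega
      exact ⟨0, 0, 1, by omega, by norm_num [this]⟩
    · rcases Nat.even_or_odd v with he | ho
      · have hm : v % 2 = 0 := Nat.even_iff.mp he
        obtain ⟨m, a, b, hb, hrep⟩ := ih (v / 2) (by omega) (by omega)
        refine ⟨m, a + 1, b, hb, ?_⟩
        have h1 : v = 2 * (v / 2) := by omega
        rw [h1, hrep]
        have e1 : 2 ^ (a + 1 + b + 1) = 2 * 2 ^ (a + b + 1) := by rw [← pow_succ']; congr 1; omega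
        have e2 : 2 ^ (a + 1) = 2 * 2 ^ a := by rw [← pow_succ']
        rw [e1, e2]; ring
      · have hm : v % 2 = 1 := Nat.odd_iff.mp ho
        set u := v / 2 with hu
        have hveq : v = 2 * u + 1 := by omega
        rcases Nat.even_or_odd u with hue | huo
        · -- u even: trailing-ones block of v is exactly one bit
          have hue2 : u % 2 = 0 := Nat.even_iff.mp hue
          refine ⟨u / 2, 0, 1, by omega, ?_⟩
          norm_num
          omega
        · -- u odd: recurse; its decomposition must have a = 0
          have hu1 : 1 ≤ u := by omega
          obtain ⟨m, a, b, hb, hrep⟩ := ih u (by omega) hu1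
          have ha : a = 0 := by
            by_contra hne
            have h1 : 2 ^ (a + b + 1) = 2 * 2 ^ (a + b) := by rw [← pow_succ']
            have h2' : 2 ^ a = 2 * 2 ^ (a - 1) := by rw [← pow_succ']; congr 1; omega
            have : u % 2 = 0 := by
              obtain ⟨q1, hq1⟩ : ∃ q1, m * 2 ^ (a + b + 1) = 2 * q1 := ⟨m * 2 ^ (a + b), by rw [h1]; ring⟩
              obtain ⟨q2, hq2⟩ : ∃ q2, (2 ^ b - 1) * 2 ^ a = 2 * q2 := ⟨(2 ^ b - 1) * 2 ^ (a - 1), by rw [h2']; ring⟩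
              rw [hrep, hq1, hq2]
              omega
            have := Nat.odd_iff.mp huo
            omega
          subst ha
          refine ⟨m, 0, b + 1, by omega, ?_⟩
          have e2 : (1:Nat) ≤ 2 ^ b := Nat.one_le_two_pow
          have e3 : 2 ^ (b + 1) = 2 * 2 ^ b := by rw [← pow_succ']
          rw [hveq, hrep]
          simp only [pow_zero, mul_one, Nat.zero_add] at *
          obtain ⟨q1, hq1⟩ : ∃ q1, m * 2 ^ (b + 1) = 2 * (m * 2 ^ b) := ⟨0, by rw [e3]; ring⟩
          obtain ⟨q2, hq2⟩ : ∃ q2, m * 2 ^ (b + 1 + 1) = 2 * (m * 2 ^ (b + 1)) :=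
            ⟨0, by rw [show (2:Nat) ^ (b + 1 + 1) = 2 * 2 ^ (b + 1) from by rw [← pow_succ']]; ring⟩
          omega


-- ---- next-value facts ----

def vOf (m a b : Nat) : Nat := m * 2 ^ (a + b + 1) + (2 ^ b - 1) * 2 ^ a
def nxtOf (m a b : Nat) : Nat := (2 * m + 1) * 2 ^ (a + b) + 2 ^ (b - 1) - 1

theorem ones_vOf (m a b : Nat) : ones (vOf m a b) = ones m + b := by
  unfold vOf
  have h1 : (2 ^ b - 1) * 2 ^ a < 2 ^ (a + b + 1) := by
    have e1 : 2 ^ (a + b + 1) = 2 ^ b * 2 ^ a * 2 := by ring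
    have e2 : (2 ^ b - 1) * 2 ^ a = 2 ^ b * 2 ^ a - 2 ^ a := by rw [Nat.sub_mul, one_mul]
    have e3 : (1:Nat) ≤ 2 ^ a := Nat.one_le_two_pow
    have e4 : 2 ^ a ≤ 2 ^ b * 2 ^ a := Nat.le_mul_of_pos_left _ (by positivity)
    omega
  rw [ones_add_pow _ _ _ h1]
  congr 1
  have : (2 ^ b - 1) * 2 ^ a = (2 ^ b - 1) * 2 ^ a + 0 := by omega
  rw [this, ones_add_pow _ _ _ (by positivity), ones_zero, ones_pow_sub_one]
  omega

theorem ones_nxtOf (m a b : Nat) (hb : 1 ≤ b) : ones (nxtOf m a b) = ones m + b := by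
  unfold nxtOf
  have h1 : (1:Nat) ≤ 2 ^ (b - 1) := Nat.one_le_two_pow
  have e0 : (2 * m + 1) * 2 ^ (a + b) + 2 ^ (b - 1) - 1
      = (2 * m + 1) * 2 ^ (a + b) + (2 ^ (b - 1) - 1) := by
    obtain ⟨T, hT⟩ : ∃ T, (2 * m + 1) * 2 ^ (a + b) = T := ⟨_, rfl⟩
    rw [hT]; omega
  have h2 : 2 ^ (b - 1) - 1 < 2 ^ (a + b) := by
    have : 2 ^ (b - 1) ≤ 2 ^ (a + b) := Nat.pow_le_pow_right (by omega) (by omega)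
    omega
  rw [e0, ones_add_pow _ _ _ h2, ones_pow_sub_one]
  have h3 : ones (2 * m + 1) = ones m + 1 := by
    have := ones_two_mul_add m 1 (by omega)
    omega
  omega

theorem vOf_lt_nxtOf (m a b : Nat) (hb : 1 ≤ b) : vOf m a b < nxtOf m a b := by
  unfold vOf nxtOf
  have h1 : (1:Nat) ≤ 2 ^ (b - 1) := Nat.one_le_two_pow
  have h1a : (1:Nat) ≤ 2 ^ a := Nat.one_le_two_pow
  have e1 : (2 * m + 1) * 2 ^ (a + b) = 2 * (m * 2 ^ (a + b)) + 2 ^ (a + b) := by ring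
  have e2 : m * 2 ^ (a + b + 1) = 2 * (m * 2 ^ (a + b)) := by ring
  have e3 : (2 ^ b - 1) * 2 ^ a = 2 ^ b * 2 ^ a - 2 ^ a := by rw [Nat.sub_mul, one_mul]
  have e4 : 2 ^ (a + b) = 2 ^ b * 2 ^ a := by ring
  obtain ⟨T, hT⟩ : ∃ T, m * 2 ^ (a + b) = T := ⟨_, rfl⟩
  obtain ⟨S, hS⟩ : ∃ S, 2 ^ b * 2 ^ a = S := ⟨_, rfl⟩
  have h5 : 2 ^ a ≤ S := by rw [← hS]; exact Nat.le_mul_of_pos_left _ (by positivity)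
  rw [hT] at e1 e2
  rw [hS] at e3 e4
  rw [e1, e2, e3, e4]
  omega

theorem no_intermediate (m a b x : Nat) (hb : 1 ≤ b)
    (h1 : vOf m a b < x) (h2 : x < nxtOf m a b) : ones x ≠ ones m + b := by
  have h1b1 : (1:Nat) ≤ 2 ^ (b - 1) := Nat.one_le_two_pow
  have h1a : (1:Nat) ≤ 2 ^ a := Nat.one_le_two_pow
  have h1ab : (1:Nat) ≤ 2 ^ (a + b) := Nat.one_le_two_pow
  have hpow : 2 ^ (a + b) < 2 ^ (a + b + 1) := by
    rw [pow_succ]; omega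
  have hble : 2 ^ (b - 1) ≤ 2 ^ (a + b) := Nat.pow_le_pow_right (by omega) (by omega)
  rcases Nat.lt_or_ge x ((2 * m + 1) * 2 ^ (a + b)) with hz | hz
  · -- zone 1: x = m*2^(a+b+1) + r with (2^b-1)*2^a < r < 2^(a+b)
    obtain ⟨T, hT⟩ : ∃ T, m * 2 ^ (a + b + 1) = T := ⟨_, rfl⟩
    have hv : vOf m a b = T + (2 ^ b - 1) * 2 ^ a := by unfold vOf; rw [hT]
    have e1 : (2 * m + 1) * 2 ^ (a + b) = T + 2 ^ (a + b) := by rw [← hT]; ring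
    have hxlow : T ≤ x := by rw [hv] at h1; omega
    obtain ⟨r, hrx⟩ : ∃ r, x = T + r := ⟨x - T, by omega⟩
    have hrlt : r < 2 ^ (a + b) := by rw [e1] at hz; omega
    have hrgt : (2 ^ b - 1) * 2 ^ a < r := by rw [hv] at h1; omega
    rw [hrx, ← hT, ones_add_pow _ _ _ (by omega)]
    intro hcon
    have hones_r : ones r = b := by omega
    have := ones_max r a b hrlt hones_r
    omega
  · -- zone 2: x = (2m+1)*2^(a+b) + r with r < 2^(b-1) - 1
    obtain ⟨T, hT⟩ : ∃ T, (2 * m + 1) * 2 ^ (a + b) = T := ⟨_, rfl⟩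
    have hnx : nxtOf m a b = T + 2 ^ (b - 1) - 1 := by unfold nxtOf; rw [hT]
    rw [hT] at hz
    obtain ⟨r, hrx⟩ : ∃ r, x = T + r := ⟨x - T, by omega⟩
    have hrlt : r < 2 ^ (b - 1) - 1 := by rw [hnx] at h2; omega
    have hrsmall : r < 2 ^ (a + b) := by omega
    rw [hrx, ← hT, ones_add_pow _ _ _ hrsmall]
    have h3 : ones (2 * m + 1) = ones m + 1 := by
      have := ones_two_mul_add m 1 (by omega)
      omega
    rw [h3]
    intro hcon
    have hones_r : ones r = b - 1 := by omega
    have := ones_min r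
    rw [hones_r] at this
    omega

-- ---- the canonical list and the loop ----

def canon (v hi n : Nat) : List Int :=
  ((List.range' v (hi + 1 - v)).filter (fun x => ones x == n)).map (fun x : Nat => (x : Int))

theorem gosperLoop_stop (fuel : Nat) (stop v : Int) : gosperLoop fuel stop v stop = [] := by
  cases fuel <;> simp [gosperLoop]

theorem gosperLoop_succ (fuel : Nat) (stop v w : Int) (h : w ≠ stop) :
    gosperLoop (fuel + 1) stop v w = v :: gosperLoop fuel stop (gosperStep v) v := by
  simp only [gosperLoop, gosperStep, h, if_true]
  simp [h]

theorem gosperLoop_canon (n : Nat) : ∀ (fuel : Nat) (v : Nat) (w : Int), 1 ≤ v → ∀ hi : Nat, v ≤ hi →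
    ones v = n → ones hi = n → w ≠ (hi : Int) → hi - v < fuel →
    gosperLoop fuel (hi : Int) (v : Int) w = canon v hi n := by
  intro fuel
  induction fuel with
  | zero => intro v w _ hi _ _ _ _ hf; omega
  | succ fuel ih =>
    intro v w hv hi hvhi hones hohi hw hf
    rw [gosperLoop_succ _ _ _ _ hw]
    rcases eq_or_lt_of_le hvhi with heq | hlt
    · subst heq
      rw [gosperLoop_stop]
      unfold canon
      rw [show v + 1 - v = 1 from by omega, List.range'_one]
      simp [hones]
    · obtain ⟨m, a, b, hb, hrep⟩ := decompose v hv
      have hvofeq : vOf m a b = v := hrep.symm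
      have hstep : gosperStep (v : Int) = ((nxtOf m a b : Nat) : Int) := by
        rw [hrep]; exact gosperStep_eq m a b hb
      have hF1 : v < nxtOf m a b := by rw [← hvofeq]; exact vOf_lt_nxtOf m a b hb
      have honesv : ones v = ones m + b := by rw [← hvofeq]; exact ones_vOf m a b
      have hF2 : ones (nxtOf m a b) = n := by rw [ones_nxtOf m a b hb]; omega
      have hNI : ∀ x, v < x → x < nxtOf m a b → ones x ≠ n := by
        intro x hx1 hx2
        rw [← hvofeq] at hx1
        have := no_intermediate m a b x hb hx1 hx2
        omega
      have hnxthi : nxtOf m a b ≤ hi := by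
        by_contra hcon
        exact hNI hi hlt (by omega) hohi
      rw [hstep, ih (nxtOf m a b) (v : Int) (by omega) hi hnxthi hF2 hohi
        (by exact_mod_cast (by omega : (v:Int) ≠ (hi:Int))) (by omega)]
      -- canon v hi n = v :: canon (nxtOf m a b) hi n
      unfold canon
      have hr1 : List.range' v (hi + 1 - v)
          = List.range' v 1 ++ List.range' (v + 1) (hi - v) := by
        rw [show v + 1 = v + 1 * 1 from by omega]
        rw [List.range'_append]
        congr 1
        omega
      have hr2 : List.range' (v + 1) (hi - v)
          = List.range' (v + 1) (nxtOf m a b - (v + 1)) ++ List.range' (nxtOf m a b) (hi + 1 - nxtOf m a b) := by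
        have happ := List.range'_append (s := v + 1) (m := nxtOf m a b - (v + 1))
          (n := hi + 1 - nxtOf m a b) (step := 1)
        rw [show v + 1 + 1 * (nxtOf m a b - (v + 1)) = nxtOf m a b from by omega,
            show nxtOf m a b - (v + 1) + (hi + 1 - nxtOf m a b) = hi - v from by omega] at happ
        exact happ.symm
      rw [hr1, hr2, List.filter_append, List.filter_append, List.range'_one]
      have hkeep : List.filter (fun x => ones x == n) [v] = [v] := by simp [hones]
      have hmid : List.filter (fun x => ones x == n) (List.range' (v + 1) (nxtOf m a b - (v + 1))) = [] := by
        rw [List.filter_eq_nil_iff]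
        intro x hx
        rw [List.mem_range'_1] at hx
        simp only [beq_iff_eq]
        exact hNI x (by omega) (by omega)
      rw [hkeep, hmid]
      simp

-- ---- the A side: guards, literal, shift, fuel ----

theorem onesLiteral_fold (j : Nat) : ∀ acc : Int,
    (List.replicate j '1').foldl (fun acc c => 2 * acc + (if c == '1' then 1 else 0)) acc
      = acc * 2 ^ j + (2 ^ j - 1) := by
  induction j with
  | zero => intro acc; simp
  | succ j ih =>
    intro acc
    rw [List.replicate_succ, List.foldl_cons, ih]
    norm_num
    ring

theorem onesLiteral_eq (n : Int) : onesLiteral n = ((2 ^ n.toNat - 1 : Nat) : Int) := by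
  unfold onesLiteral
  rw [onesLiteral_fold]
  have h1 : (1:Nat) ≤ 2 ^ n.toNat := Nat.one_le_two_pow
  push_cast [h1]
  ring

theorem bits_fixed_n_eq_canon (n k : Int) (h1 : 1 ≤ n) (h2 : n ≤ k) :
    bits_fixed_n n k = canon (2 ^ n.toNat - 1) ((2 ^ n.toNat - 1) * 2 ^ (k.toNat - n.toNat)) n.toNat := by
  unfold bits_fixed_n
  rw [if_neg (by omega), if_neg (by omega)]
  simp only [onesLiteral_eq]
  have hkn : (k - n).toNat = k.toNat - n.toNat := by omega
  rw [hkn]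
  have hsh : ((2 ^ n.toNat - 1 : Nat) : Int) <<< (k.toNat - n.toNat)
      = (((2 ^ n.toNat - 1) * 2 ^ (k.toNat - n.toNat) : Nat) : Int) := by
    rw [Int.shiftLeft_eq]; push_cast; ring
  rw [hsh]
  have hlo1 : 1 ≤ 2 ^ n.toNat - 1 := by
    have : 2 ^ 1 ≤ 2 ^ n.toNat := Nat.pow_le_pow_right (by omega) (by omega)
    omega
  have hlohi : 2 ^ n.toNat - 1 ≤ (2 ^ n.toNat - 1) * 2 ^ (k.toNat - n.toNat) :=
    Nat.le_mul_of_pos_right _ (by positivity)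
  have htonat : ((((2 ^ n.toNat - 1) * 2 ^ (k.toNat - n.toNat) : Nat) : Int) - ((2 ^ n.toNat - 1 : Nat) : Int)).toNat
      = (2 ^ n.toNat - 1) * 2 ^ (k.toNat - n.toNat) - (2 ^ n.toNat - 1) := by
    obtain ⟨H, hH⟩ : ∃ H, (2 ^ n.toNat - 1) * 2 ^ (k.toNat - n.toNat) = H := ⟨_, rfl⟩
    rw [hH] at hlohi ⊢
    omega
  rw [htonat]
  apply gosperLoop_canon
  · exact hlo1
  · exact hlohi
  · exact ones_pow_sub_one n.toNat
  · rw [show (2 ^ n.toNat - 1) * 2 ^ (k.toNat - n.toNat)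
        = (2 ^ n.toNat - 1) * 2 ^ (k.toNat - n.toNat) + 0 from by omega,
      ones_add_pow _ _ _ (by positivity), ones_zero, ones_pow_sub_one]
    omega
  · intro hcon
    obtain ⟨H, hH⟩ : ∃ H, (2 ^ n.toNat - 1) * 2 ^ (k.toNat - n.toNat) = H := ⟨_, rfl⟩
    rw [hH] at hcon
    omega
  · obtain ⟨H, hH⟩ : ∃ H, (2 ^ n.toNat - 1) * 2 ^ (k.toNat - n.toNat) = H := ⟨_, rfl⟩
    rw [hH]
    omega

-- ---- the B side ----

def natComb (j k : Nat) : List Nat := (List.range (2 ^ k)).filter (fun x => ones x == j)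

theorem natComb_zero (k : Nat) : natComb 0 k = [0] := by
  unfold natComb
  have h2k : (1:Nat) ≤ 2 ^ k := Nat.one_le_two_pow
  rw [List.range_eq_range', show 2 ^ k = (2 ^ k - 1) + 1 from by omega, List.range'_succ]
  rw [List.filter_cons_of_pos (by simp [ones_zero])]
  have h0 : List.filter (fun x => ones x == 0) (List.range' (0 + 1) (2 ^ k - 1) 1) = [] := by
    rw [List.filter_eq_nil_iff]
    intro x hx
    rw [List.mem_range'_1] at hx
    simp only [beq_iff_eq]
    intro h
    have := ones_eq_zero x h
    omega
  rw [h0]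

theorem filter_lt_natComb (j k i : Nat) (h : i ≤ k) :
    (natComb j k).filter (fun x => x < 2 ^ i) = natComb j i := by
  unfold natComb
  rw [List.filter_filter]
  have hle : 2 ^ i ≤ 2 ^ k := Nat.pow_le_pow_right (by omega) h
  have hsplit : List.range (2 ^ k) = List.range (2 ^ i) ++ List.range' (2 ^ i) (2 ^ k - 2 ^ i) := by
    rw [List.range_eq_range', List.range_eq_range']
    have happ := List.range'_append (s := 0) (m := 2 ^ i) (n := 2 ^ k - 2 ^ i) (step := 1)
    rw [show 0 + 1 * 2 ^ i = 2 ^ i from by omega,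
        show 2 ^ i + (2 ^ k - 2 ^ i) = 2 ^ k from by omega] at happ
    exact happ.symm
  rw [hsplit, List.filter_append]
  have h2 : List.filter (fun a => decide (a < 2 ^ i) && (ones a == j)) (List.range' (2 ^ i) (2 ^ k - 2 ^ i)) = [] := by
    rw [List.filter_eq_nil_iff]
    intro x hx
    rw [List.mem_range'_1] at hx
    simp
    omega
  have h3 : List.filter (fun a => decide (a < 2 ^ i) && (ones a == j)) (List.range (2 ^ i))
      = List.filter (fun a => ones a == j) (List.range (2 ^ i)) := by
    apply List.filter_congr
    intro x hx
    rw [List.mem_range] at hx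
    simp [hx]
  rw [h2, h3, List.append_nil]

theorem flatMap_congr_mem {α β : Type} (l : List α) (f g : α → List β)
    (h : ∀ a ∈ l, f a = g a) : l.flatMap f = l.flatMap g := by
  induction l with
  | nil => rfl
  | cons x xs ih =>
    rw [List.flatMap_cons, List.flatMap_cons, h x (by simp), ih (fun a ha => h a (by simp [ha]))]

theorem natComb_succ (j k : Nat) :
    (List.range k).flatMap (fun i => ((natComb j k).filter (fun x => x < 2 ^ i)).map (fun x => 2 ^ i + x))
      = natComb (j + 1) k := by
  induction k with
  | zero =>
    simp [natComb, ones_zero]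
  | succ k ih =>
    rw [List.range_succ, List.flatMap_append]
    have hterm : ∀ K : Nat, k + 1 ≤ K → ∀ i, i ≤ k →
        ((natComb j K).filter (fun x => x < 2 ^ i)).map (fun x => 2 ^ i + x)
          = ((natComb j k).filter (fun x => x < 2 ^ i)).map (fun x => 2 ^ i + x) := by
      intro K hK i hi
      rw [filter_lt_natComb j K i (by omega), filter_lt_natComb j k i (by omega)]
    have hcongr : (List.range k).flatMap (fun i => ((natComb j (k + 1)).filter (fun x => x < 2 ^ i)).map (fun x => 2 ^ i + x))
        = (List.range k).flatMap (fun i => ((natComb j k).filter (fun x => x < 2 ^ i)).map (fun x => 2 ^ i + x)) := by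
      apply flatMap_congr_mem
      intro i hi
      rw [List.mem_range] at hi
      exact hterm (k + 1) (by omega) i (by omega)
    rw [hcongr, ih]
    -- last chunk: i = k
    rw [List.flatMap_cons, List.flatMap_nil, List.append_nil,
        filter_lt_natComb j (k + 1) k (by omega)]
    -- RHS: split the range at 2^k
    have h2k : (1:Nat) ≤ 2 ^ k := Nat.one_le_two_pow
    have hsplit : List.range (2 ^ (k + 1)) = List.range (2 ^ k) ++ List.range' (2 ^ k) (2 ^ k) := by
      rw [List.range_eq_range', List.range_eq_range']
      have happ := List.range'_append (s := 0) (m := 2 ^ k) (n := 2 ^ k) (step := 1)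
      rw [show 0 + 1 * 2 ^ k = 2 ^ k from by omega] at happ
      rw [show (2:Nat) ^ (k + 1) = 2 ^ k + 2 ^ k from by rw [pow_succ]; omega]
      exact happ.symm
    conv_rhs => rw [natComb, hsplit, List.filter_append]
    have hmap : List.range' (2 ^ k) (2 ^ k) = (List.range (2 ^ k)).map (fun x => 2 ^ k + x) :=
      List.range'_eq_map_range
    rw [hmap, List.filter_map]
    have hpred : ∀ x ∈ List.range (2 ^ k),
        ((fun x => ones x == j + 1) ∘ (fun x => 2 ^ k + x)) x = (ones x == j) := by
      intro x hx
      rw [List.mem_range] at hx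
      have hx1 : ones (2 ^ k + x) = 1 + ones x := by
        rw [show 2 ^ k + x = 1 * 2 ^ k + x from by omega, ones_add_pow 1 x k hx]
        have : ones 1 = 1 := by rw [ones_step 1 (by omega)]; simp [ones_zero]
        omega
      apply Bool.eq_iff_iff.mpr
      simp only [Function.comp_apply, beq_iff_eq, hx1]
      omega
    rw [List.filter_congr hpred]
    rfl

theorem map_out_flatMap {α β γ : Type} (l : List α) (f : α → List β) (g : β → γ) :
    l.flatMap (fun a => (f a).map g) = (l.flatMap f).map g := by
  induction l with
  | nil => rfl
  | cons x xs ih => simp only [List.flatMap_cons, List.map_append, ih]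

theorem filter_map_cast (l : List Nat) (P : Nat → Bool) (Q : Int → Bool)
    (h : ∀ x : Nat, Q (x : Int) = P x) :
    (l.map (fun x : Nat => (x : Int))).filter Q = (l.filter P).map (fun x : Nat => (x : Int)) := by
  induction l with
  | nil => rfl
  | cons x xs ih =>
    rw [List.map_cons, List.filter_cons, List.filter_cons, h x]
    by_cases hP : P x = true
    · rw [if_pos hP, if_pos hP, List.map_cons, ih]
    · rw [if_neg hP, if_neg hP, ih]

theorem altLevel_natComb (j : Nat) (k : Int) (hk : 0 ≤ k) :
    altLevel k ((natComb j k.toNat).map (fun x : Nat => (x : Int)))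
      = (natComb (j + 1) k.toNat).map (fun x : Nat => (x : Int)) := by
  obtain ⟨kk, rfl⟩ : ∃ kk : Nat, k = (kk : Int) := ⟨k.toNat, by omega⟩
  rw [Int.toNat_natCast]
  unfold altLevel
  rw [PySem.List.pyRange_zero_nat, List.flatMap_map]
  rw [← natComb_succ j kk]
  have hbody : ∀ i ∈ List.range kk,
      (((natComb j kk).map (fun x : Nat => (x : Int))).filter
          (fun x => x < (1 : Int) <<< (((i : Int)).toNat : Int))).map
          (fun x => (1 : Int) <<< (((i : Int)).toNat : Int) + x)
        = ((((natComb j kk).filter (fun x => x < 2 ^ i)).map (fun x => 2 ^ i + x) : List Nat)).map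
            (fun x : Nat => (x : Int)) := by
    intro i _
    have hsh : (1 : Int) <<< (((i : Int)).toNat : Int) = ((2 ^ i : Nat) : Int) := by
      rw [Int.toNat_natCast, Int.shiftLeft_eq_mul_pow, one_mul]
    rw [hsh]
    rw [filter_map_cast _ (fun x => decide (x < 2 ^ i)) _ (fun x => by simp only [decide_eq_decide]; exact Nat.cast_lt)]
    rw [List.map_map, List.map_map]
    apply List.map_congr_left
    intro x _
    simp only [Function.comp_apply]
    push_cast
    ring
  rw [flatMap_congr_mem _ _ _ hbody, map_out_flatMap]

theorem size_hi (nn kk : Nat) (h1 : 1 ≤ nn) (h2 : nn ≤ kk) :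
    Nat.size ((2 ^ nn - 1) * 2 ^ (kk - nn)) = kk := by
  have h1n : (1:Nat) ≤ 2 ^ nn := Nat.one_le_two_pow
  have h1kn : (1:Nat) ≤ 2 ^ (kk - nn) := Nat.one_le_two_pow
  have hprod : 2 ^ nn * 2 ^ (kk - nn) = 2 ^ kk := by
    rw [← pow_add]; congr 1; omega
  have hup : (2 ^ nn - 1) * 2 ^ (kk - nn) < 2 ^ kk := by
    rw [Nat.sub_mul, one_mul]
    obtain ⟨T, hT⟩ : ∃ T, 2 ^ nn * 2 ^ (kk - nn) = T := ⟨_, rfl⟩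
    rw [hT] at hprod ⊢
    have : 2 ^ (kk - nn) ≤ T := by rw [← hT]; exact Nat.le_mul_of_pos_left _ (by positivity)
    omega
  have hlow : 2 ^ (kk - 1) ≤ (2 ^ nn - 1) * 2 ^ (kk - nn) := by
    have e1 : 2 ^ (nn - 1) ≤ 2 ^ nn - 1 := by
      have : 2 ^ nn = 2 * 2 ^ (nn - 1) := by
        rw [← pow_succ']; congr 1; omega
      have h3 : (1:Nat) ≤ 2 ^ (nn - 1) := Nat.one_le_two_pow
      omega
    calc 2 ^ (kk - 1) = 2 ^ (nn - 1) * 2 ^ (kk - nn) := by rw [← pow_add]; congr 1; omega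
    _ ≤ (2 ^ nn - 1) * 2 ^ (kk - nn) := Nat.mul_le_mul_right _ e1
  have hle : Nat.size ((2 ^ nn - 1) * 2 ^ (kk - nn)) ≤ kk := Nat.size_le.mpr hup
  have hge : kk - 1 < Nat.size ((2 ^ nn - 1) * 2 ^ (kk - nn)) := Nat.lt_size.mpr hlow
  omega

theorem alt_eq_natComb (n k : Int) (h1 : 1 ≤ n) (h2 : n ≤ k) :
    bits_fixed_n_alt n k = (natComb n.toNat k.toNat).map (fun x : Nat => (x : Int)) := by
  unfold bits_fixed_n_alt
  rw [if_neg (by omega), if_neg (by omega)]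
  simp only [onesLiteral_eq]
  have hkn : (k - n).toNat = k.toNat - n.toNat := by omega
  rw [hkn]
  have hsh : ((2 ^ n.toNat - 1 : Nat) : Int) <<< (k.toNat - n.toNat)
      = (((2 ^ n.toNat - 1) * 2 ^ (k.toNat - n.toNat) : Nat) : Int) := by
    rw [Int.shiftLeft_eq]; push_cast; ring
  rw [hsh, Int.toNat_natCast, size_hi n.toNat k.toNat (by omega) (by omega)]
  have H : ∀ j : Nat, (List.range j).foldl (fun prev _ => altLevel ((k.toNat : Nat) : Int) prev) ([0] : List Int)
      = (natComb j k.toNat).map (fun x : Nat => (x : Int)) := by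
    intro j
    induction j with
    | zero => rw [natComb_zero]; rfl
    | succ j ih =>
      rw [List.range_succ, List.foldl_append, ih, List.foldl_cons, List.foldl_nil]
      have := altLevel_natComb j ((k.toNat : Nat) : Int) (by positivity)
      rw [Int.toNat_natCast] at this
      exact this
  exact H n.toNat

theorem natComb_eq_canon (n k : Nat) (h1 : 1 ≤ n) (h2 : n ≤ k) :
    (natComb n k).map (fun x : Nat => (x : Int)) = canon (2 ^ n - 1) ((2 ^ n - 1) * 2 ^ (k - n)) n := by
  unfold natComb canon
  congr 1
  have h1n : (1:Nat) ≤ 2 ^ n := Nat.one_le_two_pow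
  have h1kn : (1:Nat) ≤ 2 ^ (k - n) := Nat.one_le_two_pow
  have hlo1 : 1 ≤ 2 ^ n - 1 := by
    have : 2 ^ 1 ≤ 2 ^ n := Nat.pow_le_pow_right (by omega) (by omega)
    omega
  have hprod : 2 ^ n * 2 ^ (k - n) = 2 ^ k := by
    rw [← pow_add]
    congr 1
    omega
  have hhi : (2 ^ n - 1) * 2 ^ (k - n) + 2 ^ (k - n) = 2 ^ k := by
    rw [Nat.sub_mul, one_mul]
    obtain ⟨T, hT⟩ : ∃ T, 2 ^ n * 2 ^ (k - n) = T := ⟨_, rfl⟩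
    rw [hT] at hprod ⊢
    have : 2 ^ (k - n) ≤ T := by rw [← hT]; exact Nat.le_mul_of_pos_left _ (by positivity)
    omega
  obtain ⟨hi0, hhi0⟩ : ∃ hi0, (2 ^ n - 1) * 2 ^ (k - n) = hi0 := ⟨_, rfl⟩
  have hbound : hi0 + 1 ≤ 2 ^ k := by rw [hhi0] at hhi; omega
  have hlohi : 2 ^ n - 1 ≤ hi0 := by
    rw [← hhi0]
    exact Nat.le_mul_of_pos_right _ (by positivity)
  rw [hhi0]
  -- split range (2^k) into [0, lo) ++ [lo, hi0+1) ++ [hi0+1, 2^k)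
  have hsplit : List.range (2 ^ k)
      = (List.range' 0 (2 ^ n - 1) ++ List.range' (2 ^ n - 1) (hi0 + 1 - (2 ^ n - 1)))
        ++ List.range' (hi0 + 1) (2 ^ k - (hi0 + 1)) := by
    rw [List.range_eq_range']
    have happ1 := List.range'_append (s := 0) (m := 2 ^ n - 1) (n := hi0 + 1 - (2 ^ n - 1)) (step := 1)
    rw [show 0 + 1 * (2 ^ n - 1) = 2 ^ n - 1 from by omega,
        show (2 ^ n - 1) + (hi0 + 1 - (2 ^ n - 1)) = hi0 + 1 from by omega] at happ1
    have happ2 := List.range'_append (s := 0) (m := hi0 + 1) (n := 2 ^ k - (hi0 + 1)) (step := 1)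
    rw [show 0 + 1 * (hi0 + 1) = hi0 + 1 from by omega,
        show (hi0 + 1) + (2 ^ k - (hi0 + 1)) = 2 ^ k from by omega] at happ2
    rw [← happ2, ← happ1]
  rw [hsplit, List.filter_append, List.filter_append]
  have hlow : List.filter (fun x => ones x == n) (List.range' 0 (2 ^ n - 1)) = [] := by
    rw [List.filter_eq_nil_iff]
    intro x hx
    rw [List.mem_range'_1] at hx
    simp only [beq_iff_eq]
    intro h
    have := ones_min x
    rw [h] at this
    omega
  have hhigh : List.filter (fun x => ones x == n) (List.range' (hi0 + 1) (2 ^ k - (hi0 + 1))) = [] := by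
    rw [List.filter_eq_nil_iff]
    intro x hx
    rw [List.mem_range'_1] at hx
    simp only [beq_iff_eq]
    intro h
    have := ones_max x (k - n) n (by rw [show k - n + n = k from by omega]; omega) h
    rw [hhi0] at this
    omega
  rw [hlow, hhigh, List.nil_append, List.append_nil]

-- ===== VERDICT (by name: the statement is the Claim_ definition above) =====
theorem bits_fixed_n_spec : Claim_equal_bits_fixed_n := by
  intro n k _ hpre
  obtain ⟨h1, h2⟩ := hpre
  unfold Spec_bits_fixed_n
  rw [bits_fixed_n_eq_canon n k h1 h2,
      alt_eq_natComb n k h1 h2,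
      natComb_eq_canon n.toNat k.toNat (by omega) (by omega)]
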